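-- pv_equiv track=rewrite | github.com/cucumber/gherkin | python/gherkin/gherkin_line.py | split_table_cells
-- ===== SOURCE A (Python) =====
-- from collections.abc import Generator
--
-- def split_table_cells(row: str) -> Generator[tuple[str, int]]:
--     """
--     An iterator returning all the table cells in a row with their positions,
--     accounting for escaping.
--     """
--
--     row_iter = iter(row)
--     col = 0
--     start_col = col + 1
--     cell = ""
--     first_cell = True
--     while True:
--         char = next(row_iter, None)
--         col += 1
--         if char == "|":
--             if first_cell:
--                 # First cell (content before the first |) is skipped
--                 first_cell = False
--             else:
--                 yield cell, start_col
--             cell = ""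
--             start_col = col + 1
--         elif char == "\\":
--             char = next(row_iter, "")
--             col += 1
--             if char == "n":
--                 cell += "\n"
--             else:
--                 if char not in ["|", "\\"]:
--                     cell += "\\"
--                 cell += char
--         elif char:
--             cell += char
--         else:
--             break
-- ===== SOURCE B (Python) =====
-- def _unescape(s):
--     out = []
--     i = 0
--     n = len(s)
--     while i < n:
--         c = s[i]
--         if c == "\\":
--             if i + 1 < n:
--                 d = s[i + 1]
--                 if d == "n":
--                     out.append("\n")
--                 elif d in ("|", "\\"):
--                     out.append(d)
--                 else:
--                     out.append("\\")
--                     out.append(d)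
--                 i += 2
--             else:
--                 out.append("\\")
--                 i += 1
--         else:
--             out.append(c)
--             i += 1
--     return "".join(out)
--
--
-- def split_table_cells(row):
--     # pass 1: positions of unescaped pipes (a '\' skips the following char)
--     pipes = []
--     i = 0
--     n = len(row)
--     while i < n:
--         c = row[i]
--         if c == "\\":
--             i += 2
--         elif c == "|":
--             pipes.append(i)
--             i += 1
--         else:
--             i += 1
--     # pass 2: each cell is the unescaped text between consecutive pipes
--     for a, b in zip(pipes, pipes[1:]):
--         yield _unescape(row[a + 1 : b]), a + 2
-- ===== Notes on version B (the rewrite author's own statement) =====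
-- stated objective: alternative
-- what changed: Replaces A's single-pass state machine (col/cell/start_col/first_cell accumulators with inline escape handling) by two independent passes: one scan collecting the positions of unescaped pipes, then an unescape of each raw slice between consecutive pipes.
import Mathlib
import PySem

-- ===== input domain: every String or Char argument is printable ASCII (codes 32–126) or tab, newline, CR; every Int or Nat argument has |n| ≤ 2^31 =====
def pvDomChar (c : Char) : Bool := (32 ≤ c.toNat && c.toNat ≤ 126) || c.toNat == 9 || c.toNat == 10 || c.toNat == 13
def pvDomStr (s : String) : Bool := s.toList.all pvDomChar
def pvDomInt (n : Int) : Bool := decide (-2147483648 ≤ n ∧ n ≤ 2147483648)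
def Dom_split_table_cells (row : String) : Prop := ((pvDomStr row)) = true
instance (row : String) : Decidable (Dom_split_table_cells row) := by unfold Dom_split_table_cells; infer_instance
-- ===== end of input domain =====

-- B replaces A's single-pass state machine (col/cell/first_cell accumulators) by two passes:
-- scan once for unescaped-pipe positions, then unescape each raw slice between consecutive pipes (alternative decomposition).

-- ===== PORT A =====
-- one step of A's while-loop: (remaining chars, col, start_col, cell, first_cell); yield = cons
def pvGoA : List Char → Nat → Nat → List Char → Bool → List (String × Int)
  | [], _, _, _, _ => []                    -- char is None: break
  | c :: rest, col, start, cell, first =>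
    if c = '|' then
      if first then pvGoA rest (col+1) (col+2) [] false
      else (String.ofList cell, (start : Int)) :: pvGoA rest (col+1) (col+2) [] false
    else if c = '\\' then
      match rest with
      | [] => pvGoA [] (col+2) start (cell ++ ['\\']) first   -- next(row_iter, "") = "": cell += "\\" + ""
      | d :: rest' =>
        if d = 'n' then pvGoA rest' (col+2) start (cell ++ ['\n']) first
        else if d = '|' ∨ d = '\\' then pvGoA rest' (col+2) start (cell ++ [d]) first
        else pvGoA rest' (col+2) start (cell ++ ['\\', d]) first
    else pvGoA rest (col+1) start (cell ++ [c]) first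
  termination_by cs _ _ _ _ => cs.length

def split_table_cells (row : String) : List (String × Int) :=
  pvGoA row.toList 0 1 [] true

-- ===== PORT B =====
-- Source B's _unescape, as recursion over the character list
def pvUnescape : List Char → List Char
  | [] => []
  | c :: rest =>
    if c = '\\' then
      match rest with
      | [] => ['\\']
      | d :: rest' =>
        (if d = 'n' then ['\n'] else if d = '|' ∨ d = '\\' then [d] else ['\\', d]) ++ pvUnescape rest'
    else c :: pvUnescape rest
  termination_by cs => cs.length

-- Source B's first pass: indices of unescaped pipes
def pvFindPipes : List Char → Nat → List Nat
  | [], _ => []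
  | c :: rest, i =>
    if c = '\\' then
      match rest with
      | [] => []
      | _ :: rest' => pvFindPipes rest' (i+2)
    else if c = '|' then i :: pvFindPipes rest (i+1)
    else pvFindPipes rest (i+1)
  termination_by cs _ => cs.length

def split_table_cells_alt (row : String) : List (String × Int) :=
  let cs := row.toList
  let pipes := pvFindPipes cs 0
  (pipes.zip pipes.tail).map
    (fun ab => (String.ofList (pvUnescape ((cs.drop (ab.1 + 1)).take (ab.2 - ab.1 - 1))), (ab.1 : Int) + 2))

-- ===== PRECONDITION & SPEC =====
def Spec_split_table_cells (row : String) (out : List (String × Int)) : Prop := out = split_table_cells_alt row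
instance (row : String) (out : List (String × Int)) : Decidable (Spec_split_table_cells row out) := by unfold Spec_split_table_cells; infer_instance

-- ===== CLAIM (what is proved, stated in full; the proofs are below) =====
def Claim_equal_split_table_cells : Prop := ∀ (row : String), Dom_split_table_cells row → Spec_split_table_cells row (split_table_cells row)

-- ===== LEMMAS AND PROOFS =====

-- position of the first unescaped pipe (proof-only helper)
def pvFirstPipe : List Char → Option Nat
  | [] => none
  | c :: rest =>
    if c = '\\' then
      match rest with
      | [] => none
      | _ :: rest' => (pvFirstPipe rest').map (· + 2)
    else if c = '|' then some 0
    else (pvFirstPipe rest).map (· + 1)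

-- the body of split_table_cells_alt, with the pipe list abstracted
def pvMapPairs (cs : List Char) (ps : List Nat) : List (String × Int) :=
  (ps.zip ps.tail).map
    (fun ab => (String.ofList (pvUnescape ((cs.drop (ab.1 + 1)).take (ab.2 - ab.1 - 1))), (ab.1 : Int) + 2))

theorem fp_nil : pvFirstPipe [] = none := rfl
theorem fp_esc_nil : pvFirstPipe ['\\'] = none := by rw [pvFirstPipe.eq_def]; simp
theorem fp_esc (x : Char) (rest : List Char) :
    pvFirstPipe ('\\' :: x :: rest) = (pvFirstPipe rest).map (· + 2) := by
  rw [pvFirstPipe.eq_def]; simp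
theorem fp_pipe (rest : List Char) : pvFirstPipe ('|' :: rest) = some 0 := by
  rw [pvFirstPipe.eq_def]; simp
theorem fp_other (c : Char) (rest : List Char) (h1 : ¬ c = '\\') (h2 : ¬ c = '|') :
    pvFirstPipe (c :: rest) = (pvFirstPipe rest).map (· + 1) := by
  rw [pvFirstPipe.eq_def]; simp [h1, h2]

theorem pvFirstPipe_lt (cs : List Char) : ∀ p, pvFirstPipe cs = some p → p < cs.length := by
  fun_induction pvFirstPipe cs <;> intro p hp <;>
    simp_all [Option.map_eq_some_iff] <;>
    (try obtain ⟨q, hq, rfl⟩ := hp) <;> simp_all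

theorem goA_nil (col start : Nat) (cell : List Char) (first : Bool) :
    pvGoA [] col start cell first = [] := by rw [pvGoA.eq_def]

theorem ue_nil : pvUnescape [] = [] := by rw [pvUnescape.eq_def]
theorem ue_esc (d : Char) (t : List Char) :
    pvUnescape ('\\' :: d :: t) =
      (if d = 'n' then ['\n'] else if d = '|' ∨ d = '\\' then [d] else ['\\', d]) ++ pvUnescape t := by
  rw [pvUnescape.eq_def]; simp
theorem ue_other (c : Char) (t : List Char) (h : ¬ c = '\\') :
    pvUnescape (c :: t) = c :: pvUnescape t := by
  rw [pvUnescape.eq_def]; simp [h]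

theorem fpp_nil (i : Nat) : pvFindPipes [] i = [] := by rw [pvFindPipes.eq_def]

theorem pvFindPipes_eq (cs : List Char) (i : Nat) :
    pvFindPipes cs i =
      match pvFirstPipe cs with
      | none => []
      | some p => (i + p) :: pvFindPipes (cs.drop (p+1)) (i + p + 1) := by
  fun_induction pvFindPipes cs i with
  | case1 => simp [fp_nil]
  | case2 h => simp [fp_esc_nil]
  | case3 i x rest ih =>
    rw [ih]
    cases hfp : pvFirstPipe rest with
    | none => simp [fp_esc, hfp]
    | some q =>
      have h1 : i + (q + 2) = i + 2 + q := by omega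
      have h2 : q + 2 + 1 = q + 1 + 1 + 1 := by omega
      simp [fp_esc, hfp, h1, h2, List.drop_succ_cons]
  | case4 rest i hne ih => simp [fp_pipe]
  | case5 c rest i hne1 hne2 ih =>
    rw [ih]
    cases hfp : pvFirstPipe rest with
    | none => simp [fp_other c rest hne1 hne2, hfp]
    | some q =>
      have h1 : i + (q + 1) = i + 1 + q := by omega
      simp [fp_other c rest hne1 hne2, hfp, h1, List.drop_succ_cons]

theorem pvGoA_eq (cs : List Char) (col start : Nat) (cell : List Char) (first : Bool) :
    pvGoA cs col start cell first =
      match pvFirstPipe cs with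
      | none => []
      | some p =>
          (if first then [] else [(String.ofList (cell ++ pvUnescape (cs.take p)), (start : Int))]) ++
          pvGoA (cs.drop (p+1)) (col + p + 1) (col + p + 2) [] false := by
  fun_induction pvGoA cs col start cell first with
  | case1 => simp [fp_nil]
  | case2 rest col start cell ih => simp [fp_pipe]
  | case3 rest col start cell first h ih => simp [fp_pipe, h, ue_nil]
  | case4 col start cell first h ih => rw [goA_nil]; simp [fp_esc_nil]
  | case5 col start cell first rest' h ih =>
    rw [ih]
    cases hfp : pvFirstPipe rest' with
    | none => simp [fp_esc, hfp]
    | some q =>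
      have h1 : col + (q + 2) = col + 2 + q := by omega
      have h2 : q + 2 = q + 1 + 1 := by omega
      simp [fp_esc, hfp, h1, h2, List.drop_succ_cons, List.take_succ_cons, ue_esc, List.append_assoc]
  | case6 col start cell first d rest' hdn hd h ih =>
    rw [ih]
    cases hfp : pvFirstPipe rest' with
    | none => simp [fp_esc, hfp]
    | some q =>
      have h1 : col + (q + 2) = col + 2 + q := by omega
      have h2 : q + 2 = q + 1 + 1 := by omega
      simp [fp_esc, hfp, h1, h2, List.drop_succ_cons, List.take_succ_cons, ue_esc, hdn, hd]
  | case7 col start cell first d rest' hdn hd h ih =>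
    rw [ih]
    cases hfp : pvFirstPipe rest' with
    | none => simp [fp_esc, hfp]
    | some q =>
      have h1 : col + (q + 2) = col + 2 + q := by omega
      have h2 : q + 2 = q + 1 + 1 := by omega
      simp [fp_esc, hfp, h1, h2, List.drop_succ_cons, List.take_succ_cons, ue_esc, hdn, hd]
  | case8 c rest col start cell first hp he ih =>
    rw [ih]
    cases hfp : pvFirstPipe rest with
    | none => simp [fp_other c rest he hp, hfp]
    | some q =>
      have h1 : col + (q + 1) = col + 1 + q := by omega
      simp [fp_other c rest he hp, hfp, h1, List.drop_succ_cons, List.take_succ_cons,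
        ue_other c _ he]

theorem mp_single (cs : List Char) (a : Nat) : pvMapPairs cs [a] = [] := rfl
theorem mp_cons (cs : List Char) (a b : Nat) (ps : List Nat) :
    pvMapPairs cs (a :: b :: ps) =
      (String.ofList (pvUnescape ((cs.drop (a + 1)).take (b - a - 1))), (a : Int) + 2) ::
        pvMapPairs cs (b :: ps) := rfl

theorem pvS : ∀ (k : Nat) (cs : List Char) (a : Nat), cs.length - a ≤ k →
    pvGoA (cs.drop (a+1)) (a+1) (a+2) [] false =
      pvMapPairs cs (a :: pvFindPipes (cs.drop (a+1)) (a+1)) := by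
  intro k
  induction k with
  | zero =>
    intro cs a hk
    have hd : cs.drop (a+1) = [] := List.drop_eq_nil_of_le (by omega)
    rw [hd, goA_nil, fpp_nil, mp_single]
  | succ k ih =>
    intro cs a hk
    cases hfp : pvFirstPipe (cs.drop (a+1)) with
    | none => rw [pvGoA_eq, pvFindPipes_eq, hfp, mp_single]
    | some p =>
      have hp := pvFirstPipe_lt _ _ hfp
      rw [List.length_drop] at hp
      have hb : cs.length - (a + 1 + p) ≤ k := by omega
      have hdd : (cs.drop (a+1)).drop (p+1) = cs.drop (a + 1 + p + 1) := by
        rw [List.drop_drop]; congr 1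
      have hih := ih cs (a + 1 + p) hb
      rw [pvGoA_eq, pvFindPipes_eq, hfp]
      simp only [hdd]
      rw [mp_cons]
      have e2 : a + 1 + p - a - 1 = p := by omega
      rw [e2]
      have e3 : ((a + 2 : Nat) : Int) = (a : Int) + 2 := by push_cast; ring
      simp only [List.nil_append, e3, hih]
      congr 2

theorem pvMain (cs : List Char) :
    pvGoA cs 0 1 [] true = pvMapPairs cs (pvFindPipes cs 0) := by
  rw [pvGoA_eq, pvFindPipes_eq]
  cases hfp : pvFirstPipe cs with
  | none => rfl
  | some p =>
    simp [pvS cs.length cs p (by omega)]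

-- ===== VERDICT (by name: the statement is the Claim_ definition above) =====
theorem split_table_cells_spec : Claim_equal_split_table_cells := by
  intro row _
  unfold Spec_split_table_cells split_table_cells split_table_cells_alt
  exact pvMain row.toList
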